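-- pv_equiv track=rewrite | github.com/golbeng-original/algoritm-parctice | programmers/complete_search/task2/main.py | solution
-- ===== SOURCE A (Python) =====
-- import collections
--
-- def solution(answers):
--
--     # 각자 tester 별로 찍기 패턴
--     tester =[
--         [1,2,3,4,5],
--         [2,1,2,3,2,4,2,5],
--         [3,3,1,1,2,2,4,4,5,5]
--     ]
--
--     best_score = 0
--     scores = collections.defaultdict(list)
--
--     for j in range(3):
--
--         check_tester = tester[j]
--         score  = 0
--         for i, value in enumerate(answers):
--             score += 1 if check_tester[ i % len(check_tester) ] == value else 0
--
--         scores[score].append(j + 1)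
--         best_score = max(best_score, score)
--
--     return scores[best_score]
-- ===== SOURCE B (Python) =====
-- import collections
--
-- def solution(answers):
--     tester = [
--         [1, 2, 3, 4, 5],
--         [2, 1, 2, 3, 2, 4, 2, 5],
--         [3, 3, 1, 1, 2, 2, 4, 4, 5, 5],
--     ]
--     # 40 = lcm(5, 8, 10): every tester pattern is constant on each residue class
--     # of the answer index modulo 40, so a histogram of (index % 40, answer) pairs
--     # determines each tester's score as a sum of 40 histogram lookups.
--     cnt = collections.Counter((i % 40, v) for i, v in enumerate(answers))
--     totals = [sum(cnt[(r, t[r % len(t)])] for r in range(40)) for t in tester]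
--     best = max(totals)
--     return [j + 1 for j in range(3) if totals[j] == best]
-- ===== Notes on version B (the rewrite author's own statement) =====
-- stated objective: alternative
-- what changed: B builds a histogram (Counter) of (index mod 40, answer) pairs in one pass over the answers and computes each tester's score as a closed sum of 40 histogram lookups (40 = lcm of the pattern lengths), then selects the best by max-and-filter, instead of A's three separate cyclic scans accumulated into a defaultdict keyed by score.
import Mathlib
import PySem

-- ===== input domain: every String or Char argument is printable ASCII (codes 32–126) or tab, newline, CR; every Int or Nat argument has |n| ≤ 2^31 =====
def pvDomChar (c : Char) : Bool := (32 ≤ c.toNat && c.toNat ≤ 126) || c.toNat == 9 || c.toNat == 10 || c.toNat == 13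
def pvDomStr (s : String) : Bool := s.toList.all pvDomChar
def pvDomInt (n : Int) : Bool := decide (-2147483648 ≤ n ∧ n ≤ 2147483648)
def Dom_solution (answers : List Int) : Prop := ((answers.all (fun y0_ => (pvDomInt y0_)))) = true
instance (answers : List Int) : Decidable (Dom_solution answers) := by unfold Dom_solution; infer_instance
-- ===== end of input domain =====

-- B replaces A's three separate cyclic scans + defaultdict-of-scores by a histogram
-- (Counter) of (index mod 40, answer) pairs plus 40 closed-form lookups per pattern,
-- then a max-and-filter selection (objective: alternative).

-- ===== PORT A =====
def solution (answers : List Int) : List Int :=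
  let tester : List (List Int) := [[1,2,3,4,5],[2,1,2,3,2,4,2,5],[3,3,1,1,2,2,4,4,5,5]]
  let st := (PySem.List.pyRange 0 3 1).foldl
    (fun (st : Int × PySem.Dict Int (List Int)) j =>
      let check := PySem.List.pyGetD tester j []
      let score := (PySem.List.enumerate answers).foldl
        (fun score iv =>
          score + (if PySem.List.pyGetD check (PySem.Int.mod iv.1 (check.length : Int)) 0 == iv.2 then (1:Int) else 0)) 0
      let scores := st.2.insert score (st.2.getD score [] ++ [j + 1])
      (max st.1 score, scores))
    (0, PySem.Dict.empty)
  st.2.getD st.1 []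

-- ===== PORT B =====
def solution_alt (answers : List Int) : List Int :=
  let tester : List (List Int) := [[1,2,3,4,5],[2,1,2,3,2,4,2,5],[3,3,1,1,2,2,4,4,5,5]]
  let cnt := PySem.Dict.counter
    ((PySem.List.enumerate answers).map (fun iv => (PySem.Int.mod iv.1 40, iv.2)))
  let totals := tester.map (fun t =>
    ((PySem.List.pyRange 0 40 1).map
      (fun r => cnt.getD (r, PySem.List.pyGetD t (PySem.Int.mod r (t.length : Int)) 0) 0)).sum)
  let best := (PySem.List.max? totals (fun y => y)).getD 0
  (PySem.List.pyRange 0 3 1).filterMap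
    (fun j => if PySem.List.pyGetD totals j 0 == best then some (j + 1) else none)

-- ===== PRECONDITION & SPEC =====
def Spec_solution (answers : List Int) (out : List Int) : Prop := out = solution_alt answers
instance (answers : List Int) (out : List Int) : Decidable (Spec_solution answers out) := by unfold Spec_solution; infer_instance

-- ===== CLAIM (what is proved, stated in full; the proofs are below) =====
def Claim_equal_solution : Prop := ∀ (answers : List Int), Dom_solution answers → Spec_solution answers (solution answers)

-- ===== LEMMAS AND PROOFS =====

-- the per-tester score, as A's inner loop accumulates it
def scoreOf (t : List Int) (answers : List Int) : Int :=
  (PySem.List.enumerate answers).foldl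
    (fun score iv =>
      score + (if PySem.List.pyGetD t (PySem.Int.mod iv.1 (t.length : Int)) 0 == iv.2 then (1:Int) else 0)) 0

-- B's per-tester total: 40 histogram lookups
def totalOf (t : List Int) (answers : List Int) : Int :=
  ((PySem.List.pyRange 0 40 1).map
    (fun r => (PySem.Dict.counter
        ((PySem.List.enumerate answers).map (fun iv => (PySem.Int.mod iv.1 40, iv.2)))).getD
      (r, PySem.List.pyGetD t (PySem.Int.mod r (t.length : Int)) 0) 0)).sum

theorem le_foldl_score (t : List Int) (l : List (Int × Int)) (a : Int) :
    a ≤ l.foldl (fun score iv =>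
      score + (if PySem.List.pyGetD t (PySem.Int.mod iv.1 (t.length : Int)) 0 == iv.2 then (1:Int) else 0)) a := by
  induction l generalizing a with
  | nil => exact le_refl _
  | cons x xs ih =>
      refine le_trans ?_ (ih _)
      simp only
      split <;> omega

theorem scoreOf_nonneg (t : List Int) (answers : List Int) : 0 ≤ scoreOf t answers :=
  le_foldl_score t _ 0

-- sum over the distinct first components: one element contributes to exactly one residue
theorem sum_count_key (key : Int → Int) (l : List (Int × Int))
    (hl : ∀ p ∈ l, 0 ≤ p.1 ∧ p.1 < 40) :
    ((PySem.List.pyRange 0 40 1).map (fun r => ((l.count (r, key r) : Int)))).sum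
      = (l.countP (fun p => key p.1 == p.2) : Int) := by
  induction l with
  | nil => simp
  | cons x xs ih =>
      have hx := hl x (List.mem_cons_self)
      have hxs : ∀ p ∈ xs, 0 ≤ p.1 ∧ p.1 < 40 := fun p hp => hl p (List.mem_cons_of_mem _ hp)
      have hcount : ∀ r : Int, (x :: xs).count (r, key r)
          = (if x = (r, key r) then 1 else 0) + xs.count (r, key r) := by
        intro r
        rw [List.count_cons]
        by_cases h : x = (r, key r) <;> simp [h] <;> omega
      have hsplit :
          ((PySem.List.pyRange 0 40 1).map (fun r => (((x :: xs).count (r, key r) : Int)))).sum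
            = ((PySem.List.pyRange 0 40 1).map
                (fun r => ((if x = (r, key r) then (1:Int) else 0)))).sum
              + ((PySem.List.pyRange 0 40 1).map (fun r => ((xs.count (r, key r) : Int)))).sum := by
        rw [← PySem.List.sum_map_add_int]
        refine congrArg List.sum (List.map_congr_left ?_)
        intro r _
        rw [hcount r]
        push_cast
        ring
      have hone : ((PySem.List.pyRange 0 40 1).map
          (fun r => ((if x = (r, key r) then (1:Int) else 0)))).sum
          = (if key x.1 == x.2 then (1:Int) else 0) := by
        have hmem : x.1 ∈ PySem.List.pyRange 0 40 1 := by
          rw [PySem.List.mem_pyRange_one]; exact ⟨hx.1, hx.2⟩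
        have hnd : (PySem.List.pyRange 0 40 1).Nodup := PySem.List.nodup_pyRange_one 0 40
        rcases List.append_of_mem hmem with ⟨s1, s2, hs⟩
        rw [hs] at hnd ⊢
        have hx1s1 : x.1 ∉ s1 := by
          intro h
          exact (List.disjoint_of_nodup_append hnd) h List.mem_cons_self
        have hx1s2 : x.1 ∉ s2 := by
          have := (List.nodup_append.mp hnd).2.1
          exact (List.nodup_cons.mp this).1
        have hz1 : ∀ r ∈ s1, (if x = (r, key r) then (1:Int) else 0) = 0 := by
          intro r hr
          have : x.1 ≠ r := fun h => hx1s1 (h ▸ hr)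
          simp only [ite_eq_right_iff]
          intro he; exact absurd (congrArg Prod.fst he) this
        have hz2 : ∀ r ∈ s2, (if x = (r, key r) then (1:Int) else 0) = 0 := by
          intro r hr
          have : x.1 ≠ r := fun h => hx1s2 (h ▸ hr)
          simp only [ite_eq_right_iff]
          intro he; exact absurd (congrArg Prod.fst he) this
        rw [List.map_append, List.sum_append, List.map_cons, List.sum_cons]
        rw [List.sum_eq_zero (by simpa using fun r hr => hz1 r hr),
            List.sum_eq_zero (by simpa using fun r hr => hz2 r hr)]
        have : (if x = (x.1, key x.1) then (1:Int) else 0)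
            = (if key x.1 == x.2 then (1:Int) else 0) := by
          rcases x with ⟨a, b⟩
          by_cases h : key a = b <;> simp [h] <;> omega
        omega
      rw [hsplit, hone, ih hxs, List.countP_cons]
      by_cases h : key x.1 = x.2 <;> simp [h] <;> push_cast <;> ring

-- A's foldl score is a countP over the enumeration
theorem foldl_add_ite_countP {α : Type} (p : α → Bool) (l : List α) (a : Int) :
    l.foldl (fun s x => s + if p x then (1:Int) else 0) a = a + (l.countP p : Int) := by
  induction l generalizing a with
  | nil => simp
  | cons x xs ih =>
      rw [List.foldl_cons, ih, List.countP_cons]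
      by_cases h : p x <;> simp [h] <;> push_cast <;> ring

theorem scoreOf_eq_countP (t : List Int) (answers : List Int) :
    scoreOf t answers
      = ((PySem.List.enumerate answers).countP
          (fun iv => PySem.List.pyGetD t (PySem.Int.mod iv.1 (t.length : Int)) 0 == iv.2) : Int) := by
  unfold scoreOf
  rw [foldl_add_ite_countP]
  simp

-- B's histogram total equals A's scan score, for a pattern whose length divides 40
theorem totalOf_eq_scoreOf (t : List Int) (hpos : 0 < (t.length : Int))
    (hdvd : (t.length : Int) ∣ 40) (answers : List Int) :
    totalOf t answers = scoreOf t answers := by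
  unfold totalOf
  rw [scoreOf_eq_countP]
  have hcnt : ∀ r v, (PySem.Dict.counter
      ((PySem.List.enumerate answers).map (fun iv => (PySem.Int.mod iv.1 40, iv.2)))).getD (r, v) 0
      = (((PySem.List.enumerate answers).map (fun iv => (PySem.Int.mod iv.1 40, iv.2))).count (r, v) : Int) := by
    intro r v
    exact PySem.Dict.getD_counter _ _
  simp only [hcnt]
  rw [sum_count_key (fun r => PySem.List.pyGetD t (PySem.Int.mod r (t.length : Int)) 0)]
  · congr 1
    rw [List.countP_map]
    apply List.countP_congr
    intro p _
    simp only [Function.comp]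
    have hmm : PySem.Int.mod (PySem.Int.mod p.1 40) (t.length : Int)
        = PySem.Int.mod p.1 (t.length : Int) := by
      simp only [PySem.Int.mod_eq_emod_of_pos hpos,
        PySem.Int.mod_eq_emod_of_pos (show (0:Int) < 40 by norm_num)]
      exact Int.emod_emod_of_dvd p.1 hdvd
    rw [hmm]
  · intro p hp
    rcases List.mem_map.mp hp with ⟨q, _, rfl⟩
    exact ⟨PySem.Int.mod_nonneg _ (by norm_num), PySem.Int.mod_lt _ (by norm_num)⟩

-- the combinational tail: A's dict-of-scores lookup equals B's max-and-filter, for any three scores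
theorem tail_eq (a b c : Int) (_ha : 0 ≤ a) (_hb : 0 ≤ b) (_hc : 0 ≤ c) :
    (let d1 := (PySem.Dict.empty (κ := Int) (ν := List Int)).insert a
        ((PySem.Dict.empty (κ := Int) (ν := List Int)).getD a [] ++ [1]);
     let d2 := d1.insert b (d1.getD b [] ++ [2]);
     let d3 := d2.insert c (d2.getD c [] ++ [3]);
     d3.getD (max (max (max 0 a) b) c) [])
    =
    (let totals : List Int := [a, b, c];
     let best := (PySem.List.max? totals (fun y => y)).getD 0;
     (PySem.List.pyRange 0 3 1).filterMap
       (fun j => if PySem.List.pyGetD totals j 0 == best then some (j + 1) else none)) := by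
  have hr : PySem.List.pyRange 0 3 1 = [0, 1, 2] := by decide
  have h0 : PySem.List.pyGetD [a, b, c] 0 0 = a := by
    simp [PySem.List.pyGetD_zero_cons]
  have h1 : PySem.List.pyGetD [a, b, c] 1 0 = b := by
    have := PySem.List.pyGetD_ofNat' (xs := [a,b,c]) (k := 1) (d := 0)
    simpa using this
  have h2 : PySem.List.pyGetD [a, b, c] 2 0 = c := by
    have := PySem.List.pyGetD_ofNat' (xs := [a,b,c]) (k := 2) (d := 0)
    simpa using this
  simp only [hr, List.filterMap, PySem.List.max?_id_cons, Option.getD_some,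
    PySem.Dict.getD_insert, PySem.Dict.getD_empty, h0, h1, h2, List.foldl, beq_iff_eq,
    List.nil_append]
  split_ifs <;> first | rfl | omega

theorem solution_eq_alt (answers : List Int) : solution answers = solution_alt answers := by
  have hr : PySem.List.pyRange 0 3 1 = [0, 1, 2] := by decide
  have hA : solution answers =
      (let d1 := (PySem.Dict.empty (κ := Int) (ν := List Int)).insert (scoreOf [1,2,3,4,5] answers)
          ((PySem.Dict.empty (κ := Int) (ν := List Int)).getD (scoreOf [1,2,3,4,5] answers) [] ++ [1]);
       let d2 := d1.insert (scoreOf [2,1,2,3,2,4,2,5] answers) (d1.getD (scoreOf [2,1,2,3,2,4,2,5] answers) [] ++ [2]);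
       let d3 := d2.insert (scoreOf [3,3,1,1,2,2,4,4,5,5] answers) (d2.getD (scoreOf [3,3,1,1,2,2,4,4,5,5] answers) [] ++ [3]);
       d3.getD (max (max (max 0 (scoreOf [1,2,3,4,5] answers)) (scoreOf [2,1,2,3,2,4,2,5] answers)) (scoreOf [3,3,1,1,2,2,4,4,5,5] answers)) []) := by
    simp only [solution, hr, List.foldl, scoreOf]
    norm_num [PySem.List.pyGetD_zero_cons, PySem.List.pyGetD_ofNat']
  have hB : solution_alt answers =
      (let totals : List Int := [scoreOf [1,2,3,4,5] answers, scoreOf [2,1,2,3,2,4,2,5] answers, scoreOf [3,3,1,1,2,2,4,4,5,5] answers];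
       let best := (PySem.List.max? totals (fun y => y)).getD 0;
       (PySem.List.pyRange 0 3 1).filterMap
         (fun j => if PySem.List.pyGetD totals j 0 == best then some (j + 1) else none)) := by
    have e1 := totalOf_eq_scoreOf [1,2,3,4,5] (by norm_num) (by norm_num) answers
    have e2 := totalOf_eq_scoreOf [2,1,2,3,2,4,2,5] (by norm_num) (by norm_num) answers
    have e3 := totalOf_eq_scoreOf [3,3,1,1,2,2,4,4,5,5] (by norm_num) (by norm_num) answers
    unfold totalOf at e1 e2 e3
    simp only [solution_alt, List.map]
    simp only [e1, e2, e3]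
  rw [hA, hB]
  exact tail_eq _ _ _ (scoreOf_nonneg _ _) (scoreOf_nonneg _ _) (scoreOf_nonneg _ _)

-- ===== VERDICT (by name: the statement is the Claim_ definition above) =====
theorem solution_spec : Claim_equal_solution := by
  intro answers _
  exact solution_eq_alt answers
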